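-- pv_equiv track=rewrite | github.com/AdamZhouSE/pythonHomework | Code/CodeRecords/2223/60595/241815.py | find
-- ===== SOURCE A (Python) =====
-- def find(num):
--     result=[0,0]
--     for i in range(0,len(num)):
--         if(i+1<len(num)):
--             if(num[i]==num[i+1]):
--                 result[0]=(num[i])
--             if(abs(num[i]-num[i+1])==2):
--                 result[1]=((num[i]+num[i+1])//2)
--     return result
-- ===== SOURCE B (Python) =====
-- def find(num):
--     # Backward early-exit search: scan adjacent pairs from the end and stop at
--     # the first hit, instead of A's forward pass that keeps overwriting.
--     def search_back(pred, val):
--         for i in range(len(num) - 2, -1, -1):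
--             a, b = num[i], num[i + 1]
--             if pred(a, b):
--                 return val(a, b)
--         return 0
--     return [search_back(lambda a, b: a == b, lambda a, b: a),
--             search_back(lambda a, b: abs(a - b) == 2, lambda a, b: (a + b) // 2)]
-- ===== Notes on version B (the rewrite author's own statement) =====
-- stated objective: alternative
-- what changed: Replaces A's forward pass that overwrites a mutable two-slot result at every match by two backward early-exit searches over adjacent pairs (first hit from the end = A's last overwrite), with 0 as the not-found default.
import Mathlib
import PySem

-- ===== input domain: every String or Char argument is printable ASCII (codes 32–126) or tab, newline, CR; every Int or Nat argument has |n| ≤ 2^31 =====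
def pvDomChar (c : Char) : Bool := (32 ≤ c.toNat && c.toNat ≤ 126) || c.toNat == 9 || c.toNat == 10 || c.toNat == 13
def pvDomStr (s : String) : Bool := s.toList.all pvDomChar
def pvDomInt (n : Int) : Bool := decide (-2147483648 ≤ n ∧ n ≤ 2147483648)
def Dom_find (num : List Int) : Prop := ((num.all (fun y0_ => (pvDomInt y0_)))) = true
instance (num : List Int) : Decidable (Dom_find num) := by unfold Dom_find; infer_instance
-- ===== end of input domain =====

-- B replaces A's forward overwrite-on-every-match pass by two backward early-exit
-- searches over adjacent pairs (objective: alternative).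

-- ===== PORT A =====
-- one loop body iteration of A (i ranges over range(len(num)))
def findStep (num : List Int) (r : Int × Int) (i : Nat) : Int × Int :=
  if i + 1 < num.length then
    let a := num.getD i 0
    let b := num.getD (i+1) 0
    let r0 := if a = b then a else r.1
    let r1 := if (a - b).natAbs = 2 then PySem.Int.floordiv (a + b) 2 else r.2
    (r0, r1)
  else r

def find (num : List Int) : List Int :=
  let r := (List.range num.length).foldl (findStep num) (0, 0)
  [r.1, r.2]

-- ===== PORT B =====
-- search_back: Python's 'for i in range(len(num)-2, -1, -1)' with early return,
-- ported as recursion on the index counting down (fuel n ↦ index n-1; fuel 0 = loop over, return 0)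
def searchBack (num : List Int) (pred : Int → Int → Bool) (val : Int → Int → Int) : Nat → Int
  | 0 => 0
  | i+1 =>
    let a := num.getD i 0
    let b := num.getD (i+1) 0
    if pred a b then val a b else searchBack num pred val i

def find_alt (num : List Int) : List Int :=
  [searchBack num (fun a b => a == b) (fun a _ => a) (num.length - 1),
   searchBack num (fun a b => (a - b).natAbs == 2)
     (fun a b => PySem.Int.floordiv (a + b) 2) (num.length - 1)]

-- ===== PRECONDITION & SPEC =====
def Spec_find (num : List Int) (out : List Int) : Prop := out = find_alt num
instance (num : List Int) (out : List Int) : Decidable (Spec_find num out) := by unfold Spec_find; infer_instance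

-- ===== CLAIM (what is proved, stated in full; the proofs are below) =====
def Claim_equal_find : Prop := ∀ (num : List Int), Dom_find num → Spec_find num (find num)

-- ===== LEMMAS AND PROOFS =====

-- pair-level step (A's body expressed on an adjacent pair)
def pstep (r : Int × Int) (p : Int × Int) : Int × Int :=
  (if p.1 = p.2 then p.1 else r.1,
   if (p.1 - p.2).natAbs = 2 then PySem.Int.floordiv (p.1 + p.2) 2 else r.2)

-- Option-valued mirror of searchBack (none = loop fell through)
def searchBackO (num : List Int) (pred : Int → Int → Bool) (val : Int → Int → Int) : Nat → Option Int
  | 0 => none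
  | i+1 =>
    let a := num.getD i 0
    let b := num.getD (i+1) 0
    if pred a b then some (val a b) else searchBackO num pred val i

-- "first hit from the back" over a pairs list
def fbo (pred : Int → Int → Bool) (val : Int → Int → Int) : List (Int × Int) → Option Int
  | [] => none
  | q :: t => (fbo pred val t).elim (if pred q.1 q.2 then some (val q.1 q.2) else none) some

theorem searchBack_eq_O (num : List Int) (p : Int → Int → Bool) (v : Int → Int → Int) :
    ∀ n, searchBack num p v n = (searchBackO num p v n).getD 0 := by
  intro n
  induction n with
  | zero => rfl
  | succ i ih =>
    simp only [searchBack, searchBackO]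
    split <;> simp [ih]

theorem searchBackO_cons (x : Int) (xs : List Int) (p : Int → Int → Bool) (v : Int → Int → Int) :
    ∀ i, searchBackO (x :: xs) p v (i+1) =
      (searchBackO xs p v i).elim
        (if p x (xs.getD 0 0) then some (v x (xs.getD 0 0)) else none) some := by
  intro i
  induction i with
  | zero => simp [searchBackO, Option.elim]
  | succ j ih =>
    show searchBackO (x :: xs) p v (j+2) = _
    simp only [searchBackO, List.getD_cons_succ] at *
    split <;> simp_all [Option.elim]

theorem searchBackO_eq_fbo (p : Int → Int → Bool) (v : Int → Int → Int) :
    ∀ num : List Int, searchBackO num p v (num.length - 1) = fbo p v (num.zip num.tail) := by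
  intro num
  induction num with
  | nil => rfl
  | cons x xs ih =>
    cases xs with
    | nil => rfl
    | cons y ys =>
      show searchBackO (x :: y :: ys) p v ((y :: ys).length - 1 + 1) = _
      rw [searchBackO_cons]
      show _ = fbo p v ((x, y) :: (y :: ys).zip ys)
      rw [show fbo p v ((x, y) :: (y :: ys).zip ys) = (fbo p v ((y :: ys).zip ys)).elim
            (if p x y then some (v x y) else none) some from rfl]
      rw [ih]
      rfl

theorem foldl_pstep_eq_fbo : ∀ (q : List (Int × Int)) (r : Int × Int),
    q.foldl pstep r =
      ((fbo (fun a b => a == b) (fun a _ => a) q).getD r.1,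
       (fbo (fun a b => (a - b).natAbs == 2) (fun a b => PySem.Int.floordiv (a + b) 2) q).getD r.2) := by
  intro q
  induction q with
  | nil => intro r; rfl
  | cons p t ih =>
    intro r
    rw [List.foldl_cons, ih]
    simp only [fbo]
    cases h1 : fbo (fun a b => a == b) (fun a _ => a) t <;>
      cases h2 : fbo (fun a b => (a - b).natAbs == 2) (fun a b => PySem.Int.floordiv (a + b) 2) t <;>
        by_cases e1 : p.1 = p.2 <;> by_cases e2 : (p.1 - p.2).natAbs = 2 <;>
          simp [pstep, Option.elim, e1, e2]

theorem findStep_succ (x : Int) (xs : List Int) (r : Int × Int) (i : Nat) :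
    findStep (x :: xs) r (i+1) = findStep xs r i := by
  simp only [findStep, List.length_cons, List.getD_cons_succ]
  by_cases h : i + 1 < xs.length
  · rw [if_pos (by omega), if_pos h]
  · rw [if_neg (by omega), if_neg h]

theorem range_fold (num : List Int) : ∀ r : Int × Int,
    (List.range num.length).foldl (findStep num) r = (num.zip num.tail).foldl pstep r := by
  induction num with
  | nil => intro r; rfl
  | cons x xs ih =>
    intro r
    rw [List.length_cons, List.range_succ_eq_map, List.foldl_cons, List.foldl_map]
    rw [List.foldl_ext _ (findStep xs) _ (fun s i _ => findStep_succ x xs s i)]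
    rw [ih]
    cases xs with
    | nil => rfl
    | cons y ys =>
      have h0 : findStep (x :: y :: ys) r 0 = pstep r (x, y) := by
        simp [findStep, pstep]
      rw [h0]; rfl

-- ===== VERDICT (by name: the statement is the Claim_ definition above) =====
theorem find_spec : Claim_equal_find := by
  intro num _
  unfold Spec_find find find_alt
  rw [range_fold num (0, 0), foldl_pstep_eq_fbo,
      searchBack_eq_O, searchBack_eq_O, searchBackO_eq_fbo, searchBackO_eq_fbo]
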